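-- pv_equiv track=rewrite | github.com/ThomasBollmeier/advent-of-code-2023 | 11/main.py | expand_indices
-- ===== SOURCE A (Python) =====
-- def expand_indices(idxs, expansion_factor):
--   idxs = sorted(idxs)
--   idxs.insert(0, -1)
--   gaps = [a - b - 1 for a, b in zip(idxs[1:], idxs)]
--   accum_gaps = []
--   accum_gap = 0
--   for gap in gaps:
--     accum_gap += gap * (expansion_factor - 1)
--     accum_gaps.append(accum_gap)
--   return dict([(idx, idx + accum_gap) for idx, accum_gap in zip(idxs[1:], accum_gaps)])
-- ===== SOURCE B (Python) =====
-- def expand_indices(idxs, expansion_factor):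
--     # The accumulated gap before the element of sorted rank i telescopes to
--     # (idx - i) * (expansion_factor - 1): no gaps list, no running total.
--     return {idx: idx + (idx - i) * (expansion_factor - 1)
--             for i, idx in enumerate(sorted(idxs))}
-- ===== Notes on version B (the rewrite author's own statement) =====
-- stated objective: simpler
-- what changed: Replaces the sentinel, the gaps list and the cumulative-sum loop by the telescoped closed form idx + (idx - rank)*(expansion_factor-1) over the enumerated sorted list.
import Mathlib
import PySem

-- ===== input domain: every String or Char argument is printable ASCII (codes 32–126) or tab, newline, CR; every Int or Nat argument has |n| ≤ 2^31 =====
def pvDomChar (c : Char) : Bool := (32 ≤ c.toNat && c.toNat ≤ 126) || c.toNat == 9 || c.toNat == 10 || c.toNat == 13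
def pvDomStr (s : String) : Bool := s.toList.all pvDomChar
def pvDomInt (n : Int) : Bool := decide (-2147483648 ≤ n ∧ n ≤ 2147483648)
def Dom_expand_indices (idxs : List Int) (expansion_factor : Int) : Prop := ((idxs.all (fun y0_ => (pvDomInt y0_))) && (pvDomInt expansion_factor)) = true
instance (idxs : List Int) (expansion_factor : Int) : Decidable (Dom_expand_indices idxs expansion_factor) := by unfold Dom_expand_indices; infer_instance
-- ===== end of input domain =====

-- B drops A's -1 sentinel, gaps list and running total in favour of the
-- telescoped closed form idx + (idx - rank)*(expansion_factor - 1); objective: simpler.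

-- ===== PORT A =====
def expand_indices (idxs : List Int) (expansion_factor : Int) : List (Int × Int) :=
  let s := PySem.List.sorted idxs (fun x => x) false
  let idxs' := (-1 : Int) :: s                                   -- idxs.insert(0, -1)
  let gaps := (List.zip (idxs'.drop 1) idxs').map (fun ab => ab.1 - ab.2 - 1)
  let st := gaps.foldl (fun (st : List Int × Int) gap =>
      let accum_gap := st.2 + gap * (expansion_factor - 1)
      (st.1 ++ [accum_gap], accum_gap)) ([], 0)                  -- (accum_gaps, accum_gap)
  (PySem.Dict.ofList ((List.zip (idxs'.drop 1) st.1).map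
      (fun p => (p.1, p.1 + p.2)))).items

-- ===== PORT B =====
def expand_indices_alt (idxs : List Int) (expansion_factor : Int) : List (Int × Int) :=
  (PySem.Dict.ofList ((PySem.List.enumerate (PySem.List.sorted idxs (fun x => x) false)).map
      (fun p => (p.2, p.2 + (p.2 - p.1) * (expansion_factor - 1))))).items

-- ===== PRECONDITION & SPEC =====
def Spec_expand_indices (idxs : List Int) (expansion_factor : Int) (out : List (Int × Int)) : Prop := out = expand_indices_alt idxs expansion_factor
instance (idxs : List Int) (expansion_factor : Int) (out : List (Int × Int)) : Decidable (Spec_expand_indices idxs expansion_factor out) := by unfold Spec_expand_indices; infer_instance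

-- ===== CLAIM (what is proved, stated in full; the proofs are below) =====
def Claim_equal_expand_indices : Prop := ∀ (idxs : List Int) (expansion_factor : Int), Dom_expand_indices idxs expansion_factor → Spec_expand_indices idxs expansion_factor (expand_indices idxs expansion_factor)

-- ===== LEMMAS AND PROOFS =====

-- A's accumulation loop, characterized: the accum_gaps list it builds is the
-- closed form c + (y - p - (i - k + 1))*e at each enumerated position (i, y).
lemma fold_accum_spec (e : Int) : ∀ (s : List Int) (p c : Int) (L : List Int) (k : Int),
    (((List.zip s (p :: s)).map (fun ab => ab.1 - ab.2 - 1)).foldl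
        (fun (st : List Int × Int) gap =>
          (st.1 ++ [st.2 + gap * e], st.2 + gap * e)) (L, c)).1
    = L ++ (PySem.List.enumerate s k).map (fun q => c + (q.2 - p - (q.1 - k + 1)) * e) := by
  intro s
  induction s with
  | nil => intro p c L k; simp [PySem.List.enumerate_nil]
  | cons x xs ih =>
    intro p c L k
    simp only [List.zip_cons_cons, List.map_cons, List.foldl_cons, PySem.List.enumerate_cons,
      List.map_cons]
    rw [ih x (c + (x - p - 1) * e) (L ++ [c + (x - p - 1) * e]) (k + 1)]
    rw [List.append_assoc, List.singleton_append,
      List.map_congr_left (l := PySem.List.enumerate xs (k + 1))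
        (f := fun q => c + (x - p - 1) * e + (q.2 - x - (q.1 - (k + 1) + 1)) * e)
        (g := fun q => c + (q.2 - p - (q.1 - k + 1)) * e) (fun q _ => by ring)]
    congr 1
    ring_nf

-- zipping a list with a map over its own enumeration fuses into one map
lemma zip_map_enumerate {β : Type} (g : Int × Int → β) :
    ∀ (s : List Int) (k : Int),
    List.zip s ((PySem.List.enumerate s k).map g)
    = (PySem.List.enumerate s k).map (fun q => (q.2, g q)) := by
  intro s
  induction s with
  | nil => intro k; simp [PySem.List.enumerate_nil]
  | cons x xs ih =>
    intro k
    simp only [PySem.List.enumerate_cons, List.map_cons, List.zip_cons_cons]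
    rw [ih (k + 1)]

-- ===== VERDICT (by name: the statement is the Claim_ definition above) =====
theorem expand_indices_spec : Claim_equal_expand_indices := by
  intro idxs e _
  unfold Spec_expand_indices expand_indices expand_indices_alt
  simp only [List.drop_succ_cons, List.drop_zero]
  rw [fold_accum_spec (e - 1) (PySem.List.sorted idxs (fun x => x) false) (-1) 0 [] 0]
  rw [List.nil_append]
  rw [zip_map_enumerate (fun q => 0 + (q.2 - -1 - (q.1 - 0 + 1)) * (e - 1))]
  rw [List.map_map]
  congr 2
  apply List.map_congr_left
  intro q _
  simp only [Function.comp, Prod.mk.injEq, true_and]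
  ring
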